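-- pv_equiv track=rewrite | github.com/Niewidzialny84/advent-of-code-2023 | day9/solution.py | differencesBackwards
-- ===== SOURCE A (Python) =====
-- def differencesBackwards(numbers: list) -> list:
--     array = []
--
--     for i, number in enumerate(numbers):
--         if i >= len(numbers) - 1:
--             break
--         array.append((number - numbers[i + 1]) * -1)
--
--     zeroes = array.count(0)
--
--     if array == []:
--         return [0]
--
--     if zeroes == len(array):
--         return [array[0]]
--     else:
--         recur = differencesBackwards(array)
--         return [array[0] - recur[0]] + recur
-- ===== SOURCE B (Python) =====
-- def differencesBackwards(numbers: list) -> list: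
--     # iterative: build all difference rows, then fold the first elements upward
--     rows = []
--     cur = [b - a for a, b in zip(numbers, numbers[1:])]
--     while cur and any(x != 0 for x in cur):
--         rows.append(cur)
--         cur = [b - a for a, b in zip(cur, cur[1:])]
--     res = [0]
--     for row in reversed(rows):
--         res = [row[0] - res[0]] + res
--     return res
-- ===== Notes on version B (the rewrite author's own statement) =====
-- stated objective: alternative
-- what changed: Replaces A's recursion (rebuild diffs, recurse, prepend) by an iterative construction of all difference rows followed by a single backward fold over their first elements.
import Mathlib
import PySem

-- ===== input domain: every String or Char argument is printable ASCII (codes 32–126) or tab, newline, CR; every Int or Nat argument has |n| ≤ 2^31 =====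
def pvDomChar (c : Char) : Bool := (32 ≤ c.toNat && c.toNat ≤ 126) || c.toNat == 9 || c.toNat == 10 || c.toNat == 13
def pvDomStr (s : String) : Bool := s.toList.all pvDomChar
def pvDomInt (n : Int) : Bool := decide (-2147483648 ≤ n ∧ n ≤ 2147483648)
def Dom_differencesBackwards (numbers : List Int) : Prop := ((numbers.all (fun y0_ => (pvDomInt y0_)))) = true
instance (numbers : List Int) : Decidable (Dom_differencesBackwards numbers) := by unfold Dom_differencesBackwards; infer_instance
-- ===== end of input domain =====

-- B replaces A's recursion by an iterative build of the difference rows followed by a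
-- backward fold over their first elements (objective: alternative decomposition, same cost).


-- ===== PORT A =====
-- A's 'for i, number in enumerate(numbers)' loop with its break; break = return the
-- accumulator.  numbers[i+1] is in range whenever the branch is taken (i < len-1),
-- so pyGet? is some there; .getD 0 is never the default on a reached branch.
def pvALoop (numbers : List Int) : List (Int × Int) → List Int → List Int
  | [], array => array
  | (i, number) :: rest, array =>
      if i ≥ (numbers.length : Int) - 1 then array   -- break
      else pvALoop numbers rest
            (array ++ [(number - (PySem.List.pyGet? numbers (i + 1)).getD 0) * (-1)])

-- first-difference list, stated directly; used to justify A's termination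
def pvDiffs (xs : List Int) : List Int := (xs.zip xs.tail).map (fun p => p.2 - p.1)

theorem pvDiffs_length (xs : List Int) : (pvDiffs xs).length = xs.length - 1 := by
  simp [pvDiffs]

theorem pvALoop_drop (ns : List Int) :
    ∀ (suf : List Int) (k : Nat) (acc : List Int), ns.drop k = suf →
      pvALoop ns (PySem.List.enumerate suf (k : Int)) acc = acc ++ pvDiffs suf := by
  intro suf
  induction suf with
  | nil => intro k acc _; simp [PySem.List.enumerate, pvALoop, pvDiffs]
  | cons a suf ih =>
    intro k acc hdrop
    have hk : k < ns.length := by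
      by_contra h
      simp [List.drop_eq_nil_of_le (le_of_not_gt h)] at hdrop
    have hdrop' : ns.drop (k + 1) = suf := by
      rw [← List.tail_drop, hdrop]; rfl
    cases suf with
    | nil =>
      have hlen : ns.length = k + 1 := by
        have := congrArg List.length hdrop
        simp at this; omega
      simp [PySem.List.enumerate_cons, pvALoop, hlen, pvDiffs]
    | cons b t =>
      have hlen : k + 2 ≤ ns.length := by
        have := congrArg List.length hdrop
        simp at this; omega
      have hb : PySem.List.pyGet? ns ((k : Int) + 1) = some b := by
        have h1 : ((k : Int) + 1) = ((k + 1 : Nat) : Int) := by push_cast; ring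
        rw [h1, PySem.List.pyGet?_natCast]
        have : (ns.drop (k + 1))[0]? = ns[k + 1]? := by
          simp [List.getElem?_drop]
        rw [hdrop'] at this
        simpa using this.symm
      rw [PySem.List.enumerate_cons]
      have hcond : ¬ ((k : Int) ≥ (ns.length : Int) - 1) := by
        omega
      simp only [pvALoop, if_neg hcond, hb, Option.getD_some]
      have hcast : ((k : Int) + 1) = ((k + 1 : Nat) : Int) := by omega
      rw [hcast, ih (k + 1) _ hdrop']
      simp [pvDiffs, List.append_assoc]

theorem pvALoop_eq (ns : List Int) :
    pvALoop ns (PySem.List.enumerate ns) [] = pvDiffs ns := by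
  have := pvALoop_drop ns ns 0 [] (by simp)
  simpa using this

def differencesBackwards (numbers : List Int) : List Int :=
  let array := pvALoop numbers (PySem.List.enumerate numbers) []
  let zeroes := PySem.List.count array 0
  if array = [] then [0]
  else if zeroes = array.length then [(PySem.List.pyGet? array 0).getD 0]
  else
    let recur := differencesBackwards array
    ((PySem.List.pyGet? array 0).getD 0 - (PySem.List.pyGet? recur 0).getD 0) :: recur
termination_by numbers.length
decreasing_by
  rename_i harr _
  have h2 : pvDiffs numbers ≠ [] := by rw [← pvALoop_eq ]; exact harr
  have h1 := pvDiffs_length numbers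
  have h3 : 0 < (pvDiffs numbers).length := List.length_pos_iff.mpr h2
  show (pvALoop numbers (PySem.List.enumerate numbers) []).length < numbers.length
  rw [pvALoop_eq]
  omega

-- ===== PORT B =====
-- B's diff comprehension: [b - a for a, b in zip(numbers, numbers[1:])]
def pvBDiffs (xs : List Int) : List Int :=
  (xs.zip (PySem.List.slice xs (some 1) none)).map (fun p => p.2 - p.1)

theorem pvBDiffs_length_lt (xs : List Int) (h : xs ≠ []) :
    (pvBDiffs xs).length < xs.length := by
  have h0 : 0 < xs.length := List.length_pos_iff.mpr h
  simp [pvBDiffs, PySem.List.slice_from_one]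
  omega

-- B's while loop: collect rows while the current row is nonempty and not all zero
def pvRows (cur : List Int) : List (List Int) :=
  if h : cur ≠ [] ∧ cur.any (fun x => x != 0) = true then cur :: pvRows (pvBDiffs cur) else []
termination_by cur.length
decreasing_by exact pvBDiffs_length_lt cur h.1

def differencesBackwards_alt (numbers : List Int) : List Int :=
  let rows := pvRows (pvBDiffs numbers)
  rows.reverse.foldl
    (fun res row =>
      ((PySem.List.pyGet? row 0).getD 0 - (PySem.List.pyGet? res 0).getD 0) :: res) [0]

-- ===== PRECONDITION & SPEC =====
def Spec_differencesBackwards (numbers : List Int) (out : List Int) : Prop := out = differencesBackwards_alt numbers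
instance (numbers : List Int) (out : List Int) : Decidable (Spec_differencesBackwards numbers out) := by unfold Spec_differencesBackwards; infer_instance

-- ===== CLAIM (what is proved, stated in full; the proofs are below) =====
def Claim_equal_differencesBackwards : Prop := ∀ (numbers : List Int), Dom_differencesBackwards numbers → Spec_differencesBackwards numbers (differencesBackwards numbers)

-- ===== LEMMAS AND PROOFS =====

theorem pvDiffs_eq_pvBDiffs (xs : List Int) : pvDiffs xs = pvBDiffs xs := by
  simp [pvDiffs, pvBDiffs, PySem.List.slice_from_one]

def pvStep (res row : List Int) : List Int :=
  ((PySem.List.pyGet? row 0).getD 0 - (PySem.List.pyGet? res 0).getD 0) :: res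

theorem pv_main (N : Nat) : ∀ n : List Int, n.length ≤ N →
    differencesBackwards n = (pvRows (pvBDiffs n)).reverse.foldl pvStep [0] := by
  induction N with
  | zero =>
    intro n hn
    have : n = [] := List.eq_nil_of_length_eq_zero (by omega)
    subst this
    rw [differencesBackwards]
    simp [pvALoop, PySem.List.enumerate_nil, pvRows, pvBDiffs]
  | succ N ih =>
    intro n hn
    rw [differencesBackwards]
    simp only [pvALoop_eq, pvDiffs_eq_pvBDiffs]
    by_cases hnil : pvBDiffs n = []
    · simp [hnil, pvRows]
    · by_cases hz : PySem.List.count (pvBDiffs n) 0 = (pvBDiffs n).length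
      · -- all-zero row: A returns [row[0]] and row[0] = 0; B collects no rows
        have hall : ∀ x ∈ pvBDiffs n, x = 0 := by
          intro x hx
          have := List.count_eq_length.mp (by simpa [PySem.List.count] using hz)
          exact (this x hx).symm
        have hany : (pvBDiffs n).any (fun x => x != 0) = false := by
          simp only [List.any_eq_false]
          intro x hx; simpa using hall x hx
        have hhead : (PySem.List.pyGet? (pvBDiffs n) 0).getD 0 = 0 := by
          cases hget : PySem.List.pyGet? (pvBDiffs n) 0 with
          | none => simp
          | some v =>
            rw [PySem.List.pyGet?_zero] at hget
            have hv : v ∈ pvBDiffs n := List.mem_of_getElem? hget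
            simp [hall v hv]
        have hz' : List.count 0 (pvBDiffs n) = (pvBDiffs n).length := by
          simpa [PySem.List.count] using hz
        rw [pvRows]
        simp [hnil, hz', hany, hhead]
      · -- recursive case
        have hany : (pvBDiffs n).any (fun x => x != 0) = true := by
          by_contra h
          apply hz
          have hall := List.any_eq_false.mp (Bool.eq_false_iff.mpr h)
          simp only [PySem.List.count]
          apply List.count_eq_length.mpr
          intro x hx
          have := hall x hx
          simp at this
          simp [this]
        have hlt : (pvBDiffs n).length < n.length := pvBDiffs_length_lt n (by
          intro h; rw [h] at hnil; simp [pvBDiffs] at hnil)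
        have hrec := ih (pvBDiffs n) (by omega)
        rw [pvRows]
        rw [dif_pos (show pvBDiffs n ≠ [] ∧ (pvBDiffs n).any (fun x => x != 0) = true from
          ⟨hnil, hany⟩)]
        simp only [List.reverse_cons, List.foldl_append, List.foldl_cons, List.foldl_nil]
        have hz' : ¬ List.count 0 (pvBDiffs n) = (pvBDiffs n).length := by
          simpa [PySem.List.count] using hz
        rw [← hrec]
        simp [hnil, PySem.List.count, hz', pvStep]

-- ===== VERDICT (by name: the statement is the Claim_ definition above) =====
theorem differencesBackwards_spec : Claim_equal_differencesBackwards := by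
  intro numbers _
  unfold Spec_differencesBackwards differencesBackwards_alt
  exact pv_main numbers.length numbers le_rfl
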